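-- pv_equiv track=rewrite | github.com/DessyAg/exam | examno3.py | rowSumOddNumbers
-- ===== SOURCE A (Python) =====
-- def rowSumOddNumbers(n) :
-- 	thelist = []
-- 	nilai = 1
--
-- 	for i in range(1, n+1):
-- 		rowlist = []
-- 		for j in range (i):
-- 			rowlist.append(nilai)
-- 			nilai += 2
-- 		thelist.append(rowlist)
-- 	return thelist
-- ===== SOURCE B (Python) =====
-- def rowSumOddNumbers(n):
--     # each row i (1-based) starts at i*(i-1)+1 and holds i consecutive odds
--     return [list(range(i * (i - 1) + 1, i * (i - 1) + 1 + 2 * i, 2))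
--             for i in range(1, n + 1)]
-- ===== Notes on version B (the rewrite author's own statement) =====
-- stated objective: simpler
-- what changed: Each row is computed independently from its row index via a closed-form start as a step-two range comprehension, dropping A's cross-row running counter and inner append loop.
import Mathlib
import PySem

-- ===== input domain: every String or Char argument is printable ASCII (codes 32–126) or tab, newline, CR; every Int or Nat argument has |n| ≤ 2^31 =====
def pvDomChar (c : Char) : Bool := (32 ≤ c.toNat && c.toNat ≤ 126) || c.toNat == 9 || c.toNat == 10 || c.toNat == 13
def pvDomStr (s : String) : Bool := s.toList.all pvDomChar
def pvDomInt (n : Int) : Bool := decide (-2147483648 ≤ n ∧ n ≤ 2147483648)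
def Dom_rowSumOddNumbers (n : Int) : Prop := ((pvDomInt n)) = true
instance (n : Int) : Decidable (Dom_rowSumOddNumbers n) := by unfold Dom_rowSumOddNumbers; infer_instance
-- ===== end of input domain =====

-- B computes each row independently from its index (start = i*(i-1)+1, step-2 range),
-- replacing A's cross-row running counter and inner append loop.


-- ===== PORT A =====
def rowSumOddNumbers (n : Int) : List (List Int) :=
  let st :=
    (PySem.List.pyRange 1 (n + 1) 1).foldl
      (fun (st : List (List Int) × Int) i =>
        let r :=
          (PySem.List.pyRange 0 i 1).foldl
            (fun (r : List Int × Int) _ => (r.1 ++ [r.2], r.2 + 2))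
            ([], st.2)
        (st.1 ++ [r.1], r.2))
      ([], 1)
  st.1

-- ===== PORT B =====
def rowSumOddNumbers_alt (n : Int) : List (List Int) :=
  (PySem.List.pyRange 1 (n + 1) 1).map
    (fun i => PySem.List.pyRange (i * (i - 1) + 1) (i * (i - 1) + 1 + 2 * i) 2)

-- ===== PRECONDITION & SPEC =====
def Spec_rowSumOddNumbers (n : Int) (out : List (List Int)) : Prop := out = rowSumOddNumbers_alt n
instance (n : Int) (out : List (List Int)) : Decidable (Spec_rowSumOddNumbers n out) := by unfold Spec_rowSumOddNumbers; infer_instance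

-- ===== CLAIM (what is proved, stated in full; the proofs are below) =====
def Claim_equal_rowSumOddNumbers : Prop := ∀ (n : Int), Dom_rowSumOddNumbers n → Spec_rowSumOddNumbers n (rowSumOddNumbers n)

-- ===== LEMMAS AND PROOFS =====

-- step-2 range closed form
lemma pyRange_two_closed (v : Int) (m : Nat) :
    PySem.List.pyRange v (v + 2 * (m : Int)) 2 = (List.range m).map (fun (k : Nat) => v + 2 * (k : Int)) := by
  rw [PySem.List.pyRange_of_pos _ _ (by norm_num)]
  rcases Nat.eq_zero_or_pos m with h | h
  · simp [h]
  · have hlt : v < v + 2 * (m : Int) := by omega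
    rw [if_pos hlt]
    have hc : ((v + 2 * (m : Int) - v + 2 - 1) / 2).toNat = m := by omega
    rw [hc]

-- appending one element to a step-2 range
lemma pyRange_two_succ (v : Int) (m : Nat) :
    PySem.List.pyRange v (v + 2 * ((m : Int) + 1)) 2
      = PySem.List.pyRange v (v + 2 * (m : Int)) 2 ++ [v + 2 * (m : Int)] := by
  have h1 : v + 2 * ((m : Int) + 1) = v + 2 * ((m + 1 : Nat) : Int) := by push_cast; ring
  rw [h1, pyRange_two_closed v (m + 1), pyRange_two_closed, List.range_succ, List.map_append]
  simp

-- A's inner loop from counter v over m iterations builds the step-2 range from v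
lemma inner_loop (m : Nat) (row : List Int) (v : Int) :
    (PySem.List.pyRange 0 (m : Int) 1).foldl
      (fun (r : List Int × Int) _ => (r.1 ++ [r.2], r.2 + 2)) (row, v)
      = (row ++ PySem.List.pyRange v (v + 2 * (m : Int)) 2, v + 2 * (m : Int)) := by
  induction m generalizing row v with
  | zero =>
    have h0 : PySem.List.pyRange v v 2 = [] := by
      rw [PySem.List.pyRange_of_pos _ _ (by norm_num)]; simp
    simp [PySem.List.pyRange_one_eq_nil (by omega : (0:Int) ≤ 0), h0]
  | succ m ih =>
    have hcast : ((m + 1 : Nat) : Int) = (m : Int) + 1 := by push_cast; ring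
    rw [hcast, PySem.List.pyRange_one_succ_right (by omega), List.foldl_append, ih]
    simp only [List.foldl_cons, List.foldl_nil]
    rw [pyRange_two_succ, Prod.mk.injEq]
    exact ⟨by simp, by ring⟩

-- A's outer loop produces B's rows, with counter m*(m+1)+1 after m rows
lemma outer_loop (m : Nat) :
    (PySem.List.pyRange 1 ((m : Int) + 1) 1).foldl
      (fun (st : List (List Int) × Int) i =>
        let r :=
          (PySem.List.pyRange 0 i 1).foldl
            (fun (r : List Int × Int) _ => (r.1 ++ [r.2], r.2 + 2))
            ([], st.2)
        (st.1 ++ [r.1], r.2))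
      ([], 1)
      = ((PySem.List.pyRange 1 ((m : Int) + 1) 1).map
           (fun i => PySem.List.pyRange (i * (i - 1) + 1) (i * (i - 1) + 1 + 2 * i) 2),
         (m : Int) * ((m : Int) + 1) + 1) := by
  induction m with
  | zero => simp [PySem.List.pyRange_one_eq_nil]
  | succ m ih =>
    have hcast : ((m + 1 : Nat) : Int) + 1 = ((m : Int) + 1) + 1 := by push_cast; ring
    rw [hcast, PySem.List.pyRange_one_succ_right (by omega), List.foldl_append,
      List.map_append, ih]
    simp only [List.foldl_cons, List.foldl_nil, List.map_cons, List.map_nil]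
    have hi : ((m : Int) + 1) = ((m + 1 : Nat) : Int) := by push_cast; ring
    rw [hi, inner_loop, Prod.mk.injEq]
    constructor
    · simp only [List.nil_append]
      have : PySem.List.pyRange ((m : Int) * ((m + 1 : Nat) : Int) + 1)
          ((m : Int) * ((m + 1 : Nat) : Int) + 1 + 2 * ((m + 1 : Nat) : Int)) 2
          = PySem.List.pyRange (((m + 1 : Nat) : Int) * (((m + 1 : Nat) : Int) - 1) + 1)
              (((m + 1 : Nat) : Int) * (((m + 1 : Nat) : Int) - 1) + 1 + 2 * ((m + 1 : Nat) : Int)) 2 := by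
        congr 1 <;> push_cast <;> ring
      rw [this]
    · push_cast; ring

-- ===== VERDICT (by name: the statement is the Claim_ definition above) =====
theorem rowSumOddNumbers_spec : Claim_equal_rowSumOddNumbers := by
  intro n _
  unfold Spec_rowSumOddNumbers rowSumOddNumbers rowSumOddNumbers_alt
  by_cases h : n ≤ 0
  · rw [PySem.List.pyRange_one_eq_nil (by omega)]
    simp
  · have hn : n = ((n.toNat : Int)) := by omega
    rw [hn, outer_loop]
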